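-- pv_equiv track=rewrite | github.com/Djpleasant/advent-of-code | 2024/src/advent_of_code/day_02.py | _report_passes_regular_standards
-- ===== SOURCE A (Python) =====
-- import itertools
--
-- LEVEL_MIN_VARIANCE = 1
--
-- LEVEL_MAX_VARIANCE = 3
--
-- def _get_level_step_observations(level: int, next_level: int) -> tuple[int, bool]:
--     level_variance = abs(level - next_level)
--     level_trend = next_level > level
--     return (level_variance, level_trend)
--
-- def _report_passes_regular_standards(report: list[int]) -> bool|int:
--     # Set the report trend based on the first two elements.
--     report_trend = report[1] > report[0]
--     for level, next_level in itertools.pairwise(report):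
--         variance, trend = _get_level_step_observations(
--             level=level,
--             next_level=next_level,
--         )
--         # Check for consistent trend.
--         if report_trend != trend:
--             return False
--
--         # Check for in-bounds variance.
--         if not (LEVEL_MIN_VARIANCE <= variance <= LEVEL_MAX_VARIANCE):
--             return False
--     return True
-- ===== SOURCE B (Python) =====
-- def _report_passes_regular_standards(report: list[int]) -> bool | int:
--     ascending = report[1] > report[0]
--     if report != sorted(report, reverse=not ascending):
--         return False
--     return all(1 <= abs(b - a) <= 3 for a, b in zip(report, report[1:]))
-- ===== Notes on version B (the rewrite author's own statement) =====
-- stated objective: simpler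
-- what changed: Replaces the per-step trend-tracking scan (helper computing (variance, trend) per pair, early returns) with a compare-against-sorted-copy monotonicity test plus a single pairwise variance check; the >=1 variance bound makes the non-strict sorted comparison match A's strict trend requirement exactly.
import Mathlib
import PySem

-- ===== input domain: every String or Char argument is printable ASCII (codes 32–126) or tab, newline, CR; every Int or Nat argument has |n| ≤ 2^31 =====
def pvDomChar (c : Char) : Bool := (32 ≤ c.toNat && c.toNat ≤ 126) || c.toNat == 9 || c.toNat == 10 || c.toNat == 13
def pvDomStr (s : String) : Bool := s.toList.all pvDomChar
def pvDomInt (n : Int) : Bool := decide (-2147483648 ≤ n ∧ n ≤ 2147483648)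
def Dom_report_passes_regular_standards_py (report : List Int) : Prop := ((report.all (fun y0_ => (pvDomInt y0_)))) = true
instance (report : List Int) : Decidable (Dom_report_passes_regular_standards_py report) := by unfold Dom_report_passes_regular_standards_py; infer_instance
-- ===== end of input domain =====

-- B replaces A's per-step trend-tracking scan by a compare-with-sorted-copy monotonicity
-- test plus a pairwise variance check (objective: simpler).

-- ===== PORT A =====
-- _get_level_step_observations
def getLevelStepObservations (level next_level : Int) : Int × Bool :=
  (|level - next_level|, decide (next_level > level))

-- the 'for level, next_level in itertools.pairwise(report)' loop with early returns
def aLoop (report_trend : Bool) : List Int → Bool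
  | level :: next_level :: rest =>
      let obs := getLevelStepObservations level next_level
      if report_trend != obs.2 then false
      else if ¬ (1 ≤ obs.1 ∧ obs.1 ≤ 3) then false
      else aLoop report_trend (next_level :: rest)
  | _ => true

def report_passes_regular_standards_py (report : List Int) : Bool :=
  match PySem.List.pyGet? report 1, PySem.List.pyGet? report 0 with
  | some r1, some r0 => aLoop (decide (r1 > r0)) report
  | _, _ => false  -- IndexError in Python (len < 2); excluded by Pre_

-- ===== PORT B =====
def report_passes_regular_standards_py_alt (report : List Int) : Bool :=
  match PySem.List.pyGet? report 1 with
  | none => false  -- IndexError in Python (len < 2); excluded by Pre_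
  | some r1 =>
    match PySem.List.pyGet? report 0 with
    | none => false
    | some r0 =>
      let ascending := decide (r1 > r0)
      if report ≠ PySem.List.sorted report (fun x => x) (!ascending) then false
      else (report.zip (PySem.List.slice report (some 1) none)).all
             (fun p => decide (1 ≤ |p.2 - p.1| ∧ |p.2 - p.1| ≤ 3))

-- ===== PRECONDITION & SPEC =====
-- Python A raises IndexError (report[1]) when the report has fewer than two levels.
def Pre_report_passes_regular_standards_py (report : List Int) : Prop := 2 ≤ report.length
instance (report : List Int) : Decidable (Pre_report_passes_regular_standards_py report) := by
  unfold Pre_report_passes_regular_standards_py; infer_instance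
def pvWitness_report_passes_regular_standards_py : List Int := [1, 2, 4]

def Spec_report_passes_regular_standards_py (report : List Int) (out : Bool) : Prop := out = report_passes_regular_standards_py_alt report
instance (report : List Int) (out : Bool) : Decidable (Spec_report_passes_regular_standards_py report out) := by unfold Spec_report_passes_regular_standards_py; infer_instance

-- ===== CLAIM (what is proved, stated in full; the proofs are below) =====
def Claim_equal_report_passes_regular_standards_py : Prop := ∀ (report : List Int), Dom_report_passes_regular_standards_py report → Pre_report_passes_regular_standards_py report → Spec_report_passes_regular_standards_py report (report_passes_regular_standards_py report)


-- ===== LEMMAS AND PROOFS =====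

-- the step relation that A's loop demands between consecutive levels
def stepP (t : Bool) (a b : Int) : Prop := t = decide (b > a) ∧ 1 ≤ |a - b| ∧ |a - b| ≤ 3
-- the monotone direction B's sorted-comparison enforces
def dirP (t : Bool) (a b : Int) : Prop := if t then a ≤ b else b ≤ a
-- the variance bound B's 'all' enforces
def varP (a b : Int) : Prop := 1 ≤ |b - a| ∧ |b - a| ≤ 3

lemma split_pointwise (t : Bool) (a b : Int) : stepP t a b ↔ dirP t a b ∧ varP a b := by
  unfold stepP dirP varP
  cases t <;> simp [Int.abs_eq_natAbs, -Nat.cast_natAbs] <;> omega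

lemma chain_split (t : Bool) (xs : List Int) :
    List.IsChain (stepP t) xs ↔ List.IsChain (dirP t) xs ∧ List.IsChain varP xs := by
  induction xs with
  | nil => simp
  | cons a l ih =>
    cases l with
    | nil => simp
    | cons b l' =>
      simp only [List.isChain_cons_cons, ih, split_pointwise]
      tauto

lemma aLoop_eq_true_iff (t : Bool) (xs : List Int) :
    aLoop t xs = true ↔ List.IsChain (stepP t) xs := by
  induction xs with
  | nil => simp [aLoop]
  | cons a l ih =>
    cases l with
    | nil => simp [aLoop]
    | cons b l' =>
      rw [List.isChain_cons_cons, ← ih]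
      simp only [aLoop, getLevelStepObservations]
      by_cases h1 : t = decide (b > a)
      · by_cases h2 : 1 ≤ |a - b| ∧ |a - b| ≤ 3
        · simp [stepP, h1, h2]
        · simp [stepP, h2]
      · have hb : (t != decide (b > a)) = true := by
          cases t <;> cases hd : decide (b > a) <;> simp_all
        simp [hb, stepP, h1]

lemma zipAll_eq_true_iff (xs : List Int) :
    ((xs.zip xs.tail).all (fun p => decide (1 ≤ |p.2 - p.1| ∧ |p.2 - p.1| ≤ 3))) = true
      ↔ List.IsChain varP xs := by
  induction xs with
  | nil => simp
  | cons a l ih =>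
    cases l with
    | nil => simp
    | cons b l' =>
      show (((a, b) :: (b :: l').zip l').all _) = true ↔ _
      rw [List.all_cons, Bool.and_eq_true, List.isChain_cons_cons, ← ih]
      simp [varP]

lemma chain_dir_iff_sorted (t : Bool) (xs : List Int) :
    List.IsChain (dirP t) xs ↔ xs = PySem.List.sorted xs (fun x => x) (!t) := by
  have tr : Trans (dirP t) (dirP t) (dirP t) :=
    ⟨by cases t <;> (intro a b c h1 h2; simp [dirP] at *; omega)⟩
  rw [@List.isChain_iff_pairwise _ _ _ tr]
  cases t with
  | true =>
    simp only [Bool.not_true]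
    constructor
    · intro h
      exact (PySem.List.sorted_eq_self_of_pairwise xs (fun x => x)
        (by simpa [dirP] using h)).symm
    · intro h
      have := PySem.List.sorted_pairwise (xs := xs) (key := fun (x : Int) => x)
      rw [← h] at this
      simpa [dirP] using this
  | false =>
    simp only [Bool.not_false]
    constructor
    · intro h
      exact (PySem.List.sorted_rev_eq_self_of_pairwise xs (fun x => x)
        (by simpa [dirP] using h)).symm
    · intro h
      have := PySem.List.sorted_pairwise_rev (xs := xs) (key := fun (x : Int) => x)
      rw [← h] at this
      simpa [dirP] using this

-- ===== VERDICT (by name: the statement is the Claim_ definition above) =====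
theorem report_passes_regular_standards_py_spec : Claim_equal_report_passes_regular_standards_py := by
  intro report _ hpre
  unfold Spec_report_passes_regular_standards_py
  obtain ⟨x0, x1, rest, rfl⟩ : ∃ x0 x1 rest, report = x0 :: x1 :: rest := by
    match report, hpre with
    | x0 :: x1 :: rest, _ => exact ⟨x0, x1, rest, rfl⟩
  have h0 : (0 : Int) ≤ (rest.length : Int) + 1 := by positivity
  have hget1 : PySem.List.pyGet? (x0 :: x1 :: rest) 1 = some x1 := by
    simp [PySem.List.pyGet?, PySem.List.pyIdx?]
  have hget0 : PySem.List.pyGet? (x0 :: x1 :: rest) 0 = some x0 := by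
    simp [PySem.List.pyGet?, PySem.List.pyIdx?, h0]
  simp only [report_passes_regular_standards_py, report_passes_regular_standards_py_alt,
    hget1, hget0, PySem.List.slice_from_one]
  generalize decide (x1 > x0) = t
  set xs : List Int := x0 :: x1 :: rest with hxs
  have hA := aLoop_eq_true_iff t xs
  have hZ := zipAll_eq_true_iff xs
  by_cases hs : xs = PySem.List.sorted xs (fun x => x) (!t)
  · rw [if_neg (not_not_intro hs)]
    have hchain : List.IsChain (dirP t) xs := (chain_dir_iff_sorted t xs).2 hs
    by_cases hv : List.IsChain varP xs
    · rw [show ((xs.zip xs.tail).all _) = true from hZ.2 hv]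
      exact hA.2 ((chain_split t xs).2 ⟨hchain, hv⟩)
    · have hz : ((xs.zip xs.tail).all (fun p => decide (1 ≤ |p.2 - p.1| ∧ |p.2 - p.1| ≤ 3))) = false := by
        rw [← Bool.not_eq_true]; exact fun h => hv (hZ.1 h)
      have ha : aLoop t xs = false := by
        rw [← Bool.not_eq_true]
        exact fun h => hv ((chain_split t xs).1 (hA.1 h)).2
      rw [hz, ha]
  · rw [if_pos hs]
    have ha : aLoop t xs = false := by
      rw [← Bool.not_eq_true]
      exact fun h => hs ((chain_dir_iff_sorted t xs).1 ((chain_split t xs).1 (hA.1 h)).1)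
    exact ha
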